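-- pv_equiv track=rewrite | github.com/Bajtazar/sigk_lab_1 | sigk/utils/tensor_utils.py | pad_value_with_sequence
-- ===== SOURCE A (Python) =====
-- def pad_value_with_sequence(
--     value: any, filler: any, size: int, value_pos: int
-- ) -> list[any]:
--     if (value_pos >= 0 and value_pos >= size) or (
--         value_pos < 0 and abs(value_pos) > size
--     ):
--         raise ValueError(
--             "Value position is larger than the sequence itself,"
--             f" value_pos=({value_pos}) and size=({size})"
--         )
--     if value_pos < 0:
--         value_pos += size
--     head_size = value_pos
--     tail_size = size - 1 - value_pos
--     return [
--         *[filler for _ in range(head_size)],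
--         value,
--         *[filler for _ in range(tail_size)],
--     ]
-- ===== SOURCE B (Python) =====
-- def pad_value_with_sequence(value, filler, size, value_pos):
--     if not -size <= value_pos < size:
--         raise ValueError(
--             "Value position is larger than the sequence itself,"
--             f" value_pos=({value_pos}) and size=({size})"
--         )
--     pos = value_pos % size
--     return [value if i == pos else filler for i in range(size)]
-- ===== Notes on version B (the rewrite author's own statement) =====
-- stated objective: idiomatic
-- what changed: B replaces the two-case guard and conditional index shift by a single chained range test plus modular normalization (value_pos % size), and builds the list in one pass over range(size) with a per-index conditional instead of splicing head-fillers + value + tail-fillers from three segments.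
import Mathlib
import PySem

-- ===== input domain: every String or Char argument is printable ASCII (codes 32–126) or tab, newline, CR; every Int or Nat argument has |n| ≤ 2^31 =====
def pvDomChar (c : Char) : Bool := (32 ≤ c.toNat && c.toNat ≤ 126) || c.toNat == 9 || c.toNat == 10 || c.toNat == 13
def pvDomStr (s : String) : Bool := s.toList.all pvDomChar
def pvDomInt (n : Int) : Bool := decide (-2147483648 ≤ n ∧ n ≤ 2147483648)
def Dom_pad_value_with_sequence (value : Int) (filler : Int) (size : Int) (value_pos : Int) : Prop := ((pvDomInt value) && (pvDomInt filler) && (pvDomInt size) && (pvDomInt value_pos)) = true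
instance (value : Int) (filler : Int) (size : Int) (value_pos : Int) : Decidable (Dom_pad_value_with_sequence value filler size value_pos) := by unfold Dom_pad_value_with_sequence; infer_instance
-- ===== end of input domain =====

-- B normalizes the position with value_pos % size and builds the list in one pass over
-- range(size) with a per-index conditional, instead of A's conditional shift and
-- head-fillers + value + tail-fillers splice (idiomatic single-pass decomposition).

-- ===== PORT A =====
def pad_value_with_sequence (value : Int) (filler : Int) (size : Int) (value_pos : Int) : List Int :=
  -- the ValueError branch is excluded by Pre_
  let value_pos := if value_pos < 0 then value_pos + size else value_pos
  let head_size := value_pos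
  let tail_size := size - 1 - value_pos
  ((PySem.List.pyRange 0 head_size 1).map (fun _ => filler))
    ++ [value]
    ++ ((PySem.List.pyRange 0 tail_size 1).map (fun _ => filler))

-- ===== PORT B =====
def pad_value_with_sequence_alt (value : Int) (filler : Int) (size : Int) (value_pos : Int) : List Int :=
  -- same ValueError condition (restated as a chained range test), excluded by Pre_
  let pos := PySem.Int.mod value_pos size     -- value_pos % size (size > 0 inside Pre_)
  (PySem.List.pyRange 0 size 1).map (fun i => if i = pos then value else filler)

-- ===== PRECONDITION & SPEC =====
-- Pre_ excludes exactly the inputs where the Python raises ValueError (value_pos out of range for size).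
def Pre_pad_value_with_sequence (value : Int) (filler : Int) (size : Int) (value_pos : Int) : Prop :=
  -size ≤ value_pos ∧ value_pos < size
instance (value : Int) (filler : Int) (size : Int) (value_pos : Int) : Decidable (Pre_pad_value_with_sequence value filler size value_pos) := by unfold Pre_pad_value_with_sequence; infer_instance

def pvWitness_pad_value_with_sequence : Int × Int × Int × Int := (7, 0, 4, 2)

def Spec_pad_value_with_sequence (value : Int) (filler : Int) (size : Int) (value_pos : Int) (out : List Int) : Prop := out = pad_value_with_sequence_alt value filler size value_pos
instance (value : Int) (filler : Int) (size : Int) (value_pos : Int) (out : List Int) : Decidable (Spec_pad_value_with_sequence value filler size value_pos out) := by unfold Spec_pad_value_with_sequence; infer_instance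

-- ===== CLAIM (what is proved, stated in full; the proofs are below) =====
def Claim_equal_pad_value_with_sequence : Prop := ∀ (value : Int) (filler : Int) (size : Int) (value_pos : Int), Dom_pad_value_with_sequence value filler size value_pos → Pre_pad_value_with_sequence value filler size value_pos → Spec_pad_value_with_sequence value filler size value_pos (pad_value_with_sequence value filler size value_pos)

-- ===== LEMMAS AND PROOFS =====

-- the three-segment splice at position p equals the one-pass branch over range(size)
lemma splice_eq_map_branch (f v : Int) (size p : Int) (h0 : 0 ≤ p) (h1 : p < size) :
    ((PySem.List.pyRange 0 p 1).map (fun _ => f)) ++ [v] ++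
      ((PySem.List.pyRange 0 (size - 1 - p) 1).map (fun _ => f))
    = (PySem.List.pyRange 0 size 1).map (fun i => if i = p then v else f) := by
  rw [PySem.List.pyRange_one_append 0 p size h0 (le_of_lt h1),
      PySem.List.pyRange_one_append p (p + 1) size (by omega) (by omega),
      PySem.List.pyRange_one_singleton, List.map_append, List.map_append]
  have hA : (PySem.List.pyRange 0 p 1).map (fun i => if i = p then v else f)
      = (PySem.List.pyRange 0 p 1).map (fun _ => f) :=
    List.map_congr_left (fun x hx => by
      rw [PySem.List.mem_pyRange_one] at hx; exact if_neg (by omega))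
  have hC : (PySem.List.pyRange (p + 1) size 1).map (fun i => if i = p then v else f)
      = (PySem.List.pyRange 0 (size - 1 - p) 1).map (fun _ => f) := by
    rw [List.map_congr_left (l := PySem.List.pyRange (p + 1) size 1)
          (f := fun i => if i = p then v else f) (g := fun _ => f)
          (fun x hx => by rw [PySem.List.mem_pyRange_one] at hx; exact if_neg (by omega)),
        List.map_const', List.map_const',
        PySem.List.length_pyRange_one, PySem.List.length_pyRange_one]
    congr 1
    omega
  rw [hA, hC]
  simp [List.append_assoc]

-- ===== VERDICT (by name: the statement is the Claim_ definition above) =====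
theorem pad_value_with_sequence_spec : Claim_equal_pad_value_with_sequence := by
  intro value filler size value_pos _ hpre
  obtain ⟨hlo, hhi⟩ := hpre
  have hs : 0 < size := by omega
  unfold Spec_pad_value_with_sequence pad_value_with_sequence pad_value_with_sequence_alt
  have hmod : PySem.Int.mod value_pos size
      = if value_pos < 0 then value_pos + size else value_pos := by
    rw [PySem.Int.mod_eq_emod_of_pos hs]
    split_ifs with h
    · calc value_pos % size = (value_pos + size) % size := (Int.add_emod_right _ _).symm
        _ = value_pos + size := Int.emod_eq_of_lt (by omega) (by omega)
    · exact Int.emod_eq_of_lt (by omega) (by omega)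
  rw [hmod]
  set p : Int := if value_pos < 0 then value_pos + size else value_pos with hp
  have hrange : 0 ≤ p ∧ p < size := by
    split_ifs at hp <;> omega
  exact splice_eq_map_branch filler value size p hrange.1 hrange.2
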